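-- pv_equiv track=rewrite | github.com/beryllium-org/cptoml | cptoml.py | _applyformatting
-- ===== SOURCE A (Python) =====
-- def _applyformatting(data) -> list:
--     """
--     Apply formatting.
--
--     - Spaces it out subtables.
--     - Removes blank tables.
--     """
--     bb = False  # Back to back subtable decleration
--     el = False  # no element in subtable
--     for i in range(len(data) - 1, 0, -1):
--         if data[i].startswith("["):
--             if (bb is False) and el:
--                 bb = True
--                 el = False
--                 data.insert(i, "")
--             else:  # The current subtable should be removed!
--                 data.pop(i)
--                 # Should remain true.
--         else:
--             if bb:
--                 bb = False
--             if not el: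
--                 el = True
--     del bb, el
--     return data
-- ===== SOURCE B (Python) =====
-- def _applyformatting(data) -> list:
--     """
--     Apply formatting.
--
--     - Spaces it out subtables.
--     - Removes blank tables.
--
--     Forward single pass: keep data[0]; a '[' line (i >= 1) is kept, preceded
--     by a blank line, exactly when the next line exists and is not a '[' line;
--     other lines are kept unchanged.  Writes back in place and returns data.
--     """
--     if not data:
--         return data
--     n = len(data)
--     result = [data[0]]
--     for i in range(1, n):
--         line = data[i]
--         if line.startswith("["):
--             if i + 1 < n and not data[i + 1].startswith("["):
--                 result.append("")
--                 result.append(line)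
--         else:
--             result.append(line)
--     data[:] = result
--     return data
-- ===== Notes on version B (the rewrite author's own statement) =====
-- stated objective: simpler
-- what changed: Replaced the backward in-place insert/pop loop with bb/el state flags by a forward single pass that rebuilds the list using a one-line lookahead at the next element.
import Mathlib
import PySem

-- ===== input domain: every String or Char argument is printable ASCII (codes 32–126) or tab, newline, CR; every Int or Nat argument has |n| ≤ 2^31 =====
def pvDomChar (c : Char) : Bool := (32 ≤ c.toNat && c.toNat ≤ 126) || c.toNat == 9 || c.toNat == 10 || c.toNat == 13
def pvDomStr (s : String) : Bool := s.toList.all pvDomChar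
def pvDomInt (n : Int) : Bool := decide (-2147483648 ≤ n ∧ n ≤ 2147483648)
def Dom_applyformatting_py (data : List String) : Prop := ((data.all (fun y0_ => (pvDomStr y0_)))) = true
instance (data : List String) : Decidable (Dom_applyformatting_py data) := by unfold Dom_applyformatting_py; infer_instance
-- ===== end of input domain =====

-- B replaces A's backward insert/pop loop with a forward rebuild using a one-element
-- lookahead (objective: simpler).  A mutates its argument in place and returns it;
-- B performs the same in-place rewrite (data[:] = result); the theorems here are
-- about the returned value.

-- ===== PORT A =====
-- one loop step of A: state (bb, el, current list), index i
def pvStepA (st : Bool × Bool × List String) (i : Int) : Bool × Bool × List String :=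
  let bb := st.1; let el := st.2.1; let cur := st.2.2
  if PySem.Str.startswith ((PySem.List.pyGet? cur i).getD "") "[" then
    if bb = false ∧ el = true then
      (true, false, PySem.List.insert cur i "")
    else
      match PySem.List.pop? cur i with
      | some r => (bb, el, r.2)
      | none => (bb, el, cur)   -- unreachable: i is always in range
  else
    (false, true, cur)

def applyformatting_py (data : List String) : List String :=
  ((PySem.List.pyRange ((data.length : Int) - 1) 0 (-1)).foldl pvStepA
    (false, false, data)).2.2

-- ===== PORT B =====
-- forward pass over the tail (index i ≥ 1); 'rest' plays the role of data[i+1:]: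
-- 'i + 1 < n' is 'rest ≠ []' and data[i+1] is rest's head
def pvFmtTail : List String → List String
  | [] => []
  | line :: rest =>
    if PySem.Str.startswith line "[" then
      if rest ≠ [] ∧ ¬ (PySem.Str.startswith (rest.headD "") "[" = true) then
        "" :: line :: pvFmtTail rest
      else
        pvFmtTail rest
    else
      line :: pvFmtTail rest

def applyformatting_py_alt (data : List String) : List String :=
  match data with
  | [] => []
  | h :: t => h :: pvFmtTail t

-- ===== PRECONDITION & SPEC =====
def Spec_applyformatting_py (data : List String) (out : List String) : Prop := out = applyformatting_py_alt data
instance (data : List String) (out : List String) : Decidable (Spec_applyformatting_py data out) := by unfold Spec_applyformatting_py; infer_instance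

-- ===== CLAIM (what is proved, stated in full; the proofs are below) =====
def Claim_equal_applyformatting_py : Prop := ∀ (data : List String), Dom_applyformatting_py data → Spec_applyformatting_py data (applyformatting_py data)

-- ===== LEMMAS AND PROOFS =====

-- el flag as a function of the unprocessed suffix's head
def pvElOf (s : List String) : Bool :=
  match s with
  | [] => false
  | x :: _ => !(PySem.Str.startswith x "[")

theorem pvElOf_true_iff (s : List String) :
    pvElOf s = true ↔ (s ≠ [] ∧ ¬ (PySem.Str.startswith (s.headD "") "[" = true)) := by
  cases s <;> simp [pvElOf]

theorem pv_invariant (data : List String) (m : Nat) :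
    ∀ bb el, m + 1 ≤ data.length →
      el = pvElOf (data.drop (m + 1)) →
      (el = true → bb = false) →
      ((PySem.List.pyRange (m : Int) 0 (-1)).foldl pvStepA
        (bb, el, data.take (m + 1) ++ pvFmtTail (data.drop (m + 1)))).2.2
        = data.take 1 ++ pvFmtTail (data.drop 1) := by
  induction m with
  | zero =>
      intro bb el hlen hel hbb
      rw [PySem.List.pyRange_neg_one_eq_nil (by norm_num)]
      simp
  | succ m ih =>
      intro bb el hlen hel hbb
      have hm1 : m + 1 < data.length := by omega
      have hdrop : data.drop (m + 1) = data[m+1] :: data.drop (m + 2) :=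
        List.drop_eq_getElem_cons hm1
      have htake : data.take (m + 2) = data.take (m + 1) ++ [data[m+1]] := by
        rw [List.take_add_one]
        simp [hm1]
      have hlt : (data.take (m + 1)).length = m + 1 := by
        simp; omega
      have hrw : ((m + 1 : Nat) : Int) = (m : Int) + 1 := by push_cast; ring
      rw [hrw, PySem.List.pyRange_neg_one_cons (by positivity)]
      have hrw2 : (m : Int) + 1 - 1 = (m : Int) := by ring
      rw [hrw2, List.foldl_cons]
      have hcur : data.take (m + 1 + 1) ++ pvFmtTail (data.drop (m + 1 + 1))
          = data.take (m + 1) ++ data[m+1] :: pvFmtTail (data.drop (m + 2)) := by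
        rw [show m + 1 + 1 = m + 2 from rfl, htake, List.append_assoc]; rfl
      rw [hcur]
      have hget : PySem.List.pyGet?
          (data.take (m + 1) ++ data[m+1] :: pvFmtTail (data.drop (m + 2)))
          ((m : Int) + 1) = some data[m+1] := by
        have h1 : ((m : Int) + 1) = (((data.take (m + 1)).length : Nat) : Int) := by
          rw [hlt]; push_cast; ring
        rw [h1]
        exact PySem.List.pyGet?_append_length _ _ _
      have h2 : ((m : Int) + 1) = (((m + 1 : Nat)) : Int) := by push_cast; ring
      have hlen2 : m + 1 < (data.take (m + 1) ++ data[m+1] :: pvFmtTail (data.drop (m + 2))).length := by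
        simp [hlt]
      by_cases hb : PySem.Str.startswith data[m+1] "[" = true
      · by_cases he : el = true
        · -- keep the subtable and insert a blank line before it
          have hbbf : bb = false := hbb he
          have hstep : pvStepA (bb, el,
              data.take (m + 1) ++ data[m+1] :: pvFmtTail (data.drop (m + 2)))
              ((m : Int) + 1)
              = (true, false, data.take (m + 1) ++ "" :: data[m+1] :: pvFmtTail (data.drop (m + 2))) := by
            simp only [pvStepA, hget, Option.getD_some, hb, if_true, hbbf, he, and_self]
            rw [h2, PySem.List.insert_natCast _ _ _ (le_of_lt hlen2)]
            rw [List.take_left' hlt, List.drop_left' hlt]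
          rw [hstep]
          have hcond : data.drop (m + 2) ≠ [] ∧
              ¬ (PySem.Str.startswith ((data.drop (m + 2)).headD "") "[" = true) := by
            exact (pvElOf_true_iff _).mp (hel.symm.trans he)
          have hB : pvFmtTail (data.drop (m + 1))
              = "" :: data[m+1] :: pvFmtTail (data.drop (m + 2)) := by
            rw [hdrop]
            simp only [pvFmtTail]
            rw [if_pos hb, if_pos hcond]
          rw [show data.take (m + 1) ++ "" :: data[m+1] :: pvFmtTail (data.drop (m + 2))
              = data.take (m + 1) ++ pvFmtTail (data.drop (m + 1)) by rw [hB]]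
          refine ih true false (by omega) ?_ (by simp)
          rw [hdrop]
          simp only [pvElOf, hb, Bool.not_true]
        · -- blank table: pop it
          have hef : el = false := by revert he; cases el <;> simp
          have hgetElem : (data.take (m + 1) ++ data[m+1] :: pvFmtTail (data.drop (m + 2)))[m+1]'hlen2
              = data[m+1] := by
            have h3 : (data.take (m + 1) ++ data[m+1] :: pvFmtTail (data.drop (m + 2)))[m+1]?
                = some data[m+1] := by
              rw [← PySem.List.pyGet?_natCast]
              exact_mod_cast hget
            exact (List.getElem?_eq_some_iff.mp h3).choose_spec
          have herase' : ∀ (pre l2 : List String) (x : String), pre.length = m + 1 →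
              (pre ++ x :: l2).eraseIdx (m + 1) = pre ++ l2 := by
            intro pre l2 x h
            rw [← h]
            simp [List.eraseIdx_eq_take_drop_succ]
          have herase : (data.take (m + 1) ++ data[m+1] :: pvFmtTail (data.drop (m + 2))).eraseIdx (m+1)
              = data.take (m + 1) ++ pvFmtTail (data.drop (m + 2)) :=
            herase' _ _ _ hlt
          have hpop : PySem.List.pop?
              (data.take (m + 1) ++ data[m+1] :: pvFmtTail (data.drop (m + 2)))
              ((m : Int) + 1)
              = some (data[m+1], data.take (m + 1) ++ pvFmtTail (data.drop (m + 2))) := by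
            rw [h2, PySem.List.pop?_natCast _ _ hlen2, hgetElem, herase]
          have hstep : pvStepA (bb, el,
              data.take (m + 1) ++ data[m+1] :: pvFmtTail (data.drop (m + 2)))
              ((m : Int) + 1)
              = (bb, el, data.take (m + 1) ++ pvFmtTail (data.drop (m + 2))) := by
            simp only [pvStepA, hget, Option.getD_some, hb, if_true, hef, hpop]
            simp
          rw [hstep]
          have hncond : ¬ (data.drop (m + 2) ≠ [] ∧
              ¬ (PySem.Str.startswith ((data.drop (m + 2)).headD "") "[" = true)) := by
            intro hc
            exact he (hel.trans ((pvElOf_true_iff _).mpr hc))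
          have hB : pvFmtTail (data.drop (m + 1)) = pvFmtTail (data.drop (m + 2)) := by
            rw [hdrop]
            simp only [pvFmtTail]
            rw [if_pos hb, if_neg hncond]
          rw [show data.take (m + 1) ++ pvFmtTail (data.drop (m + 2))
              = data.take (m + 1) ++ pvFmtTail (data.drop (m + 1)) by rw [hB]]
          refine ih bb el (by omega) ?_ (fun h => absurd (hef ▸ h) (by simp))
          rw [hdrop, hef]
          simp only [pvElOf, hb, Bool.not_true]
      · -- ordinary line: keep it
        have hbf : PySem.Str.startswith data[m+1] "[" = false := by
          revert hb; cases PySem.Str.startswith data[m+1] "[" <;> simp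
        have hstep : pvStepA (bb, el,
            data.take (m + 1) ++ data[m+1] :: pvFmtTail (data.drop (m + 2)))
            ((m : Int) + 1)
            = (false, true, data.take (m + 1) ++ data[m+1] :: pvFmtTail (data.drop (m + 2))) := by
          simp only [pvStepA, hget, Option.getD_some, hbf]
          simp
        rw [hstep]
        have hB : pvFmtTail (data.drop (m + 1))
            = data[m+1] :: pvFmtTail (data.drop (m + 2)) := by
          rw [hdrop]
          simp only [pvFmtTail]
          rw [if_neg hb]
        rw [show data.take (m + 1) ++ data[m+1] :: pvFmtTail (data.drop (m + 2))
            = data.take (m + 1) ++ pvFmtTail (data.drop (m + 1)) by rw [hB]]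
        refine ih false true (by omega) ?_ (by simp)
        rw [hdrop]
        simp only [pvElOf, hbf, Bool.not_false]

theorem applyformatting_py_spec : Claim_equal_applyformatting_py := by
  intro data _
  unfold Spec_applyformatting_py applyformatting_py applyformatting_py_alt
  cases data with
  | nil => simp [PySem.List.pyRange_neg_one_eq_nil]
  | cons h t =>
      have hcast : ((h :: t).length : Int) - 1 = ((t.length : Nat) : Int) := by
        simp
      rw [hcast]
      have := pv_invariant (h :: t) t.length (bb := false) (el := false)
        (by simp) (by simp [pvElOf]) (by simp)
      simpa [pvFmtTail] using this
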